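-- pv_equiv track=rewrite | github.com/amoakoakua060/alx-higher_level_programming | 0x04-python-more_data_structures/12-roman_to_int.py | getValueAndNewRoman
-- ===== SOURCE A (Python) =====
-- def getValueAndNewRoman(roman_string, a_dict):
--     r_str = rem = c = ""
--     value = 0
--     for c in roman_string:
--         r_str += c
--         if r_str in a_dict:
--             value = a_dict[r_str]
--             rem = r_str
--     if rem:
--         roman_string = roman_string[len(rem):]
--
--     return (roman_string, value)
-- ===== SOURCE B (Python) =====
-- def getValueAndNewRoman(roman_string, a_dict):
--     for L in range(len(roman_string), 0, -1):
--         prefix = roman_string[:L]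
--         if prefix in a_dict:
--             return (roman_string[L:], a_dict[prefix])
--     return (roman_string, 0)
-- ===== Notes on version B (the rewrite author's own statement) =====
-- stated objective: alternative
-- what changed: Instead of scanning left-to-right while maintaining a running best-prefix state (r_str/rem/value), B tests prefix slices from the longest down and returns at the first dictionary hit, keeping no state.
import Mathlib
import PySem

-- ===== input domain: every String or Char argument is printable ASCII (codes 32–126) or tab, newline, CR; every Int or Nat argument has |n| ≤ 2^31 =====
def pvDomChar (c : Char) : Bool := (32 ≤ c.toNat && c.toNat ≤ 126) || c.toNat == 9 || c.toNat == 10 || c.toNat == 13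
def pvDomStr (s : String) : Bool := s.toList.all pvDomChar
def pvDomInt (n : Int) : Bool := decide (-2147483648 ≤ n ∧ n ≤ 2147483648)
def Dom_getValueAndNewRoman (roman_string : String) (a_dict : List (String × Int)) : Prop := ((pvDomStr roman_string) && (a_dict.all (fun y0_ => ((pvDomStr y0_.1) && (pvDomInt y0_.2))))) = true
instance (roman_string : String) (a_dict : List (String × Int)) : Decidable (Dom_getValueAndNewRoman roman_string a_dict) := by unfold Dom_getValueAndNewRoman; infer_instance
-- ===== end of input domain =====

-- B replaces A's left-to-right scan with a running best-prefix state by a longest-first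
-- prefix search that returns at the first dictionary hit (objective: alternative decomposition).


-- ===== PORT A =====
-- one loop iteration of A: r_str += c; if r_str in a_dict: value = a_dict[r_str]; rem = r_str
-- state = (r_str, rem, value), strings kept as List Char
def pvAStep (d : PySem.Dict String Int) (st : List Char × List Char × Int) (c : Char) :
    List Char × List Char × Int :=
  match d.get? (String.ofList (st.1 ++ [c])) with
  | some v => (st.1 ++ [c], st.1 ++ [c], v)
  | none => (st.1 ++ [c], st.2.1, st.2.2)

def getValueAndNewRoman (roman_string : String) (a_dict : List (String × Int)) : String × Int :=
  let d := PySem.Dict.ofList a_dict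
  let st := roman_string.toList.foldl (pvAStep d) ([], [], 0)
  -- 'if rem:' = rem nonempty; roman_string[len(rem):] with len(rem) ≥ 0 is exactly drop
  if st.2.1 ≠ [] then (String.ofList (roman_string.toList.drop st.2.1.length), st.2.2)
  else (roman_string, st.2.2)

-- ===== PORT B =====
-- B's loop: for L in range(len(s), 0, -1): if s[:L] in a_dict: return (s[L:], a_dict[s[:L]])
-- counted down as structural recursion on L; slices with 0 ≤ L ≤ len are take/drop (exact)
def pvBLoop (d : PySem.Dict String Int) (s : String) : Nat → String × Int
  | 0 => (s, 0)
  | L + 1 =>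
    match d.get? (String.ofList (s.toList.take (L + 1))) with
    | some v => (String.ofList (s.toList.drop (L + 1)), v)
    | none => pvBLoop d s L

def getValueAndNewRoman_alt (roman_string : String) (a_dict : List (String × Int)) : String × Int :=
  pvBLoop (PySem.Dict.ofList a_dict) roman_string roman_string.toList.length

-- ===== PRECONDITION & SPEC =====
def Spec_getValueAndNewRoman (roman_string : String) (a_dict : List (String × Int)) (out : String × Int) : Prop := out = getValueAndNewRoman_alt roman_string a_dict
instance (roman_string : String) (a_dict : List (String × Int)) (out : String × Int) : Decidable (Spec_getValueAndNewRoman roman_string a_dict out) := by unfold Spec_getValueAndNewRoman; infer_instance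

-- ===== CLAIM (what is proved, stated in full; the proofs are below) =====
def Claim_equal_getValueAndNewRoman : Prop := ∀ (roman_string : String) (a_dict : List (String × Int)), Dom_getValueAndNewRoman roman_string a_dict → Spec_getValueAndNewRoman roman_string a_dict (getValueAndNewRoman roman_string a_dict)

-- ===== LEMMAS AND PROOFS =====

-- Invariant relating A's fold over the first k characters to B's countdown from k:
-- r_str is the k-prefix, and B's answer from L = k is exactly what A would output from (rem, value).
theorem pvInv (d : PySem.Dict String Int) (s : String) :
    ∀ k, k ≤ s.toList.length →
      (let st := (s.toList.take k).foldl (pvAStep d) ([], [], 0)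
       st.1 = s.toList.take k ∧
       (st.2.1 = [] → st.2.2 = 0) ∧
       pvBLoop d s k =
         (if st.2.1 = [] then (s, 0)
          else (String.ofList (s.toList.drop st.2.1.length), st.2.2))) := by
  intro k
  induction k with
  | zero => intro _; simp [pvBLoop]
  | succ k ih =>
    intro hk
    obtain ⟨hr, h0, hb⟩ := ih (Nat.le_of_succ_le hk)
    have hlt : k < s.toList.length := hk
    have htake : s.toList.take (k + 1) = s.toList.take k ++ [s.toList[k]] := by
      rw [List.take_add_one, List.getElem?_eq_getElem hlt]; rfl
    have hfold : (s.toList.take (k + 1)).foldl (pvAStep d) ([], [], 0)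
        = pvAStep d ((s.toList.take k).foldl (pvAStep d) ([], [], 0)) s.toList[k] := by
      rw [htake, List.foldl_append]; rfl
    have hrsucc : ((s.toList.take k).foldl (pvAStep d) ([], [], 0)).1 ++ [s.toList[k]]
        = s.toList.take (k + 1) := by rw [hr, ← htake]
    rw [hfold]
    simp only [pvAStep]
    rw [hrsucc]
    cases hget : d.get? (String.ofList (s.toList.take (k + 1))) with
    | some v =>
      have hlen : (s.toList.take (k + 1)).length = k + 1 := by
        rw [List.length_take]; omega
      have hne : s.toList.take (k + 1) ≠ [] := by
        intro h; rw [h] at hlen; simp at hlen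
      refine ⟨rfl, fun h => absurd h hne, ?_⟩
      simp only [pvBLoop, hget, hne, hlen]
      simp
    | none =>
      refine ⟨rfl, h0, ?_⟩
      simp only [pvBLoop, hget]
      exact hb

-- ===== VERDICT (by name: the statement is the Claim_ definition above) =====
theorem getValueAndNewRoman_spec : Claim_equal_getValueAndNewRoman := by
  intro s a_dict _
  unfold Spec_getValueAndNewRoman getValueAndNewRoman getValueAndNewRoman_alt
  obtain ⟨hr, h0, hb⟩ := pvInv (PySem.Dict.ofList a_dict) s s.toList.length le_rfl
  rw [List.take_length] at hr h0 hb
  rw [hb]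
  by_cases h : ((s.toList.foldl (pvAStep (PySem.Dict.ofList a_dict)) ([], [], 0)).2.1 = [])
  · simp [h, h0 h]
  · simp [h]
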